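-- pv_equiv track=rewrite | github.com/Camih1005/PYTHON_CAMPUS | MATRICES/ejercicioventasmatrices.py | calcProdMaxIngresosSem
-- ===== SOURCE A (Python) =====
-- def calcProdMaxIngresosSem(matVtas, matPrecios):
--     fil = len(matVtas)
--     lstTotVtas = [0] * fil
--     for f in range(fil):
--         lstTotVtas[f] = sum(matVtas[f]) * matPrecios[f]
--
--     maxVtas = max(lstTotVtas)
--     prodmaxVtas = lstTotVtas.index(maxVtas) + 1
--     return prodmaxVtas
-- ===== SOURCE B (Python) =====
-- def calcProdMaxIngresosSem(matVtas, matPrecios):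
--     # Single pass: running best total and its row index (first strict maximum wins);
--     # no intermediate totals list, no max()/index() passes.
--     bestTot = None
--     bestIdx = -1
--     for f, fila in enumerate(matVtas):
--         total = sum(fila) * matPrecios[f]
--         if bestTot is None or total > bestTot:
--             bestTot = total
--             bestIdx = f
--     if bestTot is None:
--         raise ValueError("empty sales matrix")
--     return bestIdx + 1
-- ===== Notes on version B (the rewrite author's own statement) =====
-- stated objective: alternative
-- what changed: Replaces the build-a-totals-list-then-max-then-index three-pass scheme with one fused pass keeping a running best total and its first index.
import Mathlib
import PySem

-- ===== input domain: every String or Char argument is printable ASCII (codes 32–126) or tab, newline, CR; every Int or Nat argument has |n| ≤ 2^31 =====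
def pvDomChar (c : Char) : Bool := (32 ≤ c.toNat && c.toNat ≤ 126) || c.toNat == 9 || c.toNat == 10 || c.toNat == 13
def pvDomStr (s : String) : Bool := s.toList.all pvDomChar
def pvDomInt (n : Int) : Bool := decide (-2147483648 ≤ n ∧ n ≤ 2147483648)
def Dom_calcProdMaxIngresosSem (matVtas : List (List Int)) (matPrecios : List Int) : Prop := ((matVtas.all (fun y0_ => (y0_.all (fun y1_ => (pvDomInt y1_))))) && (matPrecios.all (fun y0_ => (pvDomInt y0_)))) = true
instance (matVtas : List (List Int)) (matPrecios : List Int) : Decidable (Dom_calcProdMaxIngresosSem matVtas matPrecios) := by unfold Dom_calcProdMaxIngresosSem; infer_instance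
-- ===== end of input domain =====

-- B replaces A's three passes (totals list, max(), index()) by one fused pass keeping the
-- running best total and its first index; same return value, not measurably faster.

-- ===== PORT A =====
def calcProdMaxIngresosSem (matVtas : List (List Int)) (matPrecios : List Int) : Int :=
  let fil : Int := matVtas.length
  let lstTotVtas : List Int := List.replicate fil.toNat 0
  let lstTotVtas :=
    (PySem.List.pyRange 0 fil 1).foldl
      (fun lst f =>
        PySem.List.pySetD lst f ((PySem.List.pyGetD matVtas f []).sum * PySem.List.pyGetD matPrecios f 0))
      lstTotVtas
  let maxVtas : Int := (PySem.List.max? lstTotVtas (fun y => y)).getD 0   -- max([]) raises: excluded by Pre_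
  let prodmaxVtas : Int := (((PySem.List.index? lstTotVtas maxVtas).getD 0 : Nat) : Int) + 1
  prodmaxVtas

-- ===== PORT B =====
def calcProdMaxIngresosSem_alt (matVtas : List (List Int)) (matPrecios : List Int) : Int :=
  let st :=
    (PySem.List.enumerate matVtas 0).foldl
      (fun (st : Option Int × Int) fr =>
        let total := fr.2.sum * PySem.List.pyGetD matPrecios fr.1 0
        match st.1 with
        | none => (some total, fr.1)
        | some b => if total > b then (some total, fr.1) else st)
      (none, -1)
  -- bestTot = None (empty matrix) raises in Python B: excluded by Pre_
  st.2 + 1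

-- ===== PRECONDITION & SPEC =====
-- Pre_ excludes exactly the inputs where Python A raises: an empty matVtas (max() of an empty
-- list, ValueError) and a matPrecios shorter than matVtas (IndexError); B raises there too.
def Pre_calcProdMaxIngresosSem (matVtas : List (List Int)) (matPrecios : List Int) : Prop :=
  matVtas ≠ [] ∧ matVtas.length ≤ matPrecios.length
instance (matVtas : List (List Int)) (matPrecios : List Int) : Decidable (Pre_calcProdMaxIngresosSem matVtas matPrecios) := by unfold Pre_calcProdMaxIngresosSem; infer_instance

def pvWitness_calcProdMaxIngresosSem : List (List Int) × List Int := ([[1, 2], [3]], [5, 4])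

def Spec_calcProdMaxIngresosSem (matVtas : List (List Int)) (matPrecios : List Int) (out : Int) : Prop := out = calcProdMaxIngresosSem_alt matVtas matPrecios
instance (matVtas : List (List Int)) (matPrecios : List Int) (out : Int) : Decidable (Spec_calcProdMaxIngresosSem matVtas matPrecios out) := by unfold Spec_calcProdMaxIngresosSem; infer_instance

-- ===== CLAIM (what is proved, stated in full; the proofs are below) =====
def Claim_equal_calcProdMaxIngresosSem : Prop := ∀ (matVtas : List (List Int)) (matPrecios : List Int), Dom_calcProdMaxIngresosSem matVtas matPrecios → Pre_calcProdMaxIngresosSem matVtas matPrecios → Spec_calcProdMaxIngresosSem matVtas matPrecios (calcProdMaxIngresosSem matVtas matPrecios)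

-- ===== LEMMAS AND PROOFS =====

def pvStep (st : Option Int × Int) (i v : Int) : Option Int × Int :=
  match st.1 with
  | none => (some v, i)
  | some b => if v > b then (some v, i) else st

lemma pvIdxCons (x : Int) (xs : List Int) (M : Int) (hne : x ≠ M) (hmem : M ∈ xs) :
    (((PySem.List.index? (x :: xs) M).getD 0 : Nat) : Int)
      = (((PySem.List.index? xs M).getD 0 : Nat) : Int) + 1 := by
  obtain ⟨i, hi⟩ := (PySem.List.index?_isSome_iff xs M).mpr hmem |> Option.isSome_iff_exists.mp
  rw [PySem.List.index?_cons_of_ne xs hne, hi]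
  simp

lemma pvCoreVs : ∀ (vs : List Int) (s m j : Int),
  (PySem.List.enumerate vs s).foldl (fun st p => pvStep st p.1 p.2) (some m, j)
  = if vs.foldl max m > m
    then (some (vs.foldl max m), s + (((PySem.List.index? vs (vs.foldl max m)).getD 0 : Nat) : Int))
    else (some m, j) := by
  intro vs
  induction vs with
  | nil => intro s m j; simp [PySem.List.enumerate_nil]
  | cons x xs ih =>
    intro s m j
    rw [PySem.List.enumerate_cons]
    simp only [List.foldl_cons]
    by_cases hx : x > m
    · have hstep : pvStep (some m, j) s x = (some x, s) := by simp [pvStep, hx]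
      have hmx : max m x = x := by omega
      rw [hstep, ih (s+1) x s]
      by_cases hMx : List.foldl max x xs > x
      · have hxM : x ≠ List.foldl max x xs := by omega
        have hmem : List.foldl max x xs ∈ xs := by
          rcases PySem.List.foldl_max_mem xs x with h | h
          · omega
          · exact h
        have hMm : List.foldl max x xs > m := by omega
        simp only [hmx, if_pos hMx, if_pos hMm, pvIdxCons x xs _ hxM hmem]
        rw [Prod.mk.injEq]; exact ⟨rfl, by omega⟩
      · have hxle : x ≤ List.foldl max x xs := (PySem.List.le_foldl_max xs x).1
        have hMeq : List.foldl max x xs = x := by omega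
        simp only [hmx, hMeq, if_pos hx, PySem.List.index?_cons_self]
        simp
    · have hstep : pvStep (some m, j) s x = (some m, j) := by simp [pvStep, hx]
      have hmx : max m x = m := by omega
      rw [hstep, ih (s+1) m j]
      by_cases hMx : List.foldl max m xs > m
      · have hxM : x ≠ List.foldl max m xs := by omega
        have hmem : List.foldl max m xs ∈ xs := by
          rcases PySem.List.foldl_max_mem xs m with h | h
          · omega
          · exact h
        simp only [hmx, if_pos hMx, pvIdxCons x xs _ hxM hmem]
        rw [Prod.mk.injEq]; exact ⟨rfl, by omega⟩
      · simp only [hmx, if_neg hMx]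

-- index fold with values vf = enumerate fold over the mapped value list
lemma pvBridge (vf : Int → Int) : ∀ (k : Nat) (a b : Int) (st : Option Int × Int), (b - a).toNat = k →
  (PySem.List.pyRange a b 1).foldl (fun st i => pvStep st i (vf i)) st
  = (PySem.List.enumerate ((PySem.List.pyRange a b 1).map vf) a).foldl (fun st p => pvStep st p.1 p.2) st := by
  intro k
  induction k with
  | zero =>
    intro a b st hk
    rw [PySem.List.pyRange_one_eq_nil (by omega)]
    simp [PySem.List.enumerate_nil]
  | succ k ih =>
    intro a b st hk
    rw [PySem.List.pyRange_one_cons (by omega)]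
    simp only [List.map_cons, PySem.List.enumerate_cons, List.foldl_cons]
    exact ih (a+1) b _ (by omega)

-- A's write loop into [0]*n builds the totals list
lemma pvSetLoop (f : Int → Int) : ∀ (k : Nat) (a n : Int) (init : List Int),
    0 ≤ a → (init.length : Int) = n → (n - a).toNat = k →
    (PySem.List.pyRange a n 1).foldl (fun lst i => PySem.List.pySetD lst i (f i)) init
    = init.take a.toNat ++ (PySem.List.pyRange a n 1).map f := by
  intro k
  induction k with
  | zero =>
    intro a n init ha hn hk
    rw [PySem.List.pyRange_one_eq_nil (by omega)]
    simp only [List.foldl_nil, List.map_nil, List.append_nil]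
    rw [List.take_of_length_le (by omega)]
  | succ k ih =>
    intro a n init ha hn hk
    have han : a < n := by omega
    rw [PySem.List.pyRange_one_cons han]
    simp only [List.foldl_cons, List.map_cons]
    rw [PySem.List.pySetD_of_nonneg init (f a) ha]
    have hlen : a.toNat < init.length := by omega
    rw [ih (a+1) n _ (by omega) (by simp; omega) (by omega)]
    have h1 : (a+1).toNat = a.toNat + 1 := by omega
    rw [h1, List.take_add_one]
    have h2 : (init.set a.toNat (f a)).take a.toNat = init.take a.toNat := by
      apply List.ext_getElem <;> simp [List.getElem_set]
      intro i hi _ h; omega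
    have h3 : (init.set a.toNat (f a))[a.toNat]? = some (f a) := by
      simp [hlen]
    rw [h2, h3]
    simp

lemma pvEnumGet : ∀ (xs pre : List (List Int)) (p : Int × List Int),
    p ∈ PySem.List.enumerate xs (pre.length : Int) →
    PySem.List.pyGetD (pre ++ xs) p.1 ([] : List Int) = p.2 := by
  intro xs
  induction xs with
  | nil => intro pre p h; simp [PySem.List.enumerate_nil] at h
  | cons x xs ih =>
    intro pre p h
    rw [PySem.List.enumerate_cons] at h
    rcases List.mem_cons.mp h with h | h
    · subst h
      simp only [PySem.List.pyGetD_natCast]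
      rw [List.getD_eq_getElem?_getD, List.getElem?_append_right (le_refl _)]
      simp
    · have hcast : (pre.length : Int) + 1 = ((pre ++ [x]).length : Int) := by simp
      rw [hcast] at h
      have := ih (pre ++ [x]) p h
      simpa using this


lemma pvMain (mv : List (List Int)) (mp : List Int) (hne : mv ≠ []) :
    calcProdMaxIngresosSem mv mp = calcProdMaxIngresosSem_alt mv mp := by
  have hn : 0 < (mv.length : Int) := by
    cases mv with
    | nil => exact absurd rfl hne
    | cons a l => simp
  set vf : Int → Int := fun i => (PySem.List.pyGetD mv i []).sum * PySem.List.pyGetD mp i 0 with hvf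
  -- B side normalisation: enumerate fold = pvStep fold over the mapped totals list
  have hB : calcProdMaxIngresosSem_alt mv mp =
      ((PySem.List.enumerate ((PySem.List.pyRange 0 (mv.length : Int) 1).map vf) 0).foldl
        (fun st p => pvStep st p.1 p.2) (none, -1)).2 + 1 := by
    show ((PySem.List.enumerate mv 0).foldl
        (fun (st : Option Int × Int) (fr : Int × List Int) => pvStep st fr.1 (fr.2.sum * PySem.List.pyGetD mp fr.1 0))
        (none, -1)).2 + 1 = _
    rw [PySem.List.foldl_congr_mem (PySem.List.enumerate mv 0)
        (fun (st : Option Int × Int) (fr : Int × List Int) => pvStep st fr.1 (fr.2.sum * PySem.List.pyGetD mp fr.1 0))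
        (fun (st : Option Int × Int) (fr : Int × List Int) => pvStep st fr.1 (vf fr.1))
        (none, -1)
        (by
          intro acc x hx
          have := pvEnumGet mv [] x (by simpa using hx)
          simp only [List.nil_append] at this
          simp [hvf, this])]
    have hmap : (PySem.List.enumerate mv 0).foldl
        (fun (st : Option Int × Int) (fr : Int × List Int) => pvStep st fr.1 (vf fr.1)) (none, -1)
        = ((PySem.List.enumerate mv 0).map (fun fr => fr.1)).foldl
            (fun (st : Option Int × Int) (i : Int) => pvStep st i (vf i)) (none, -1) :=
      (List.foldl_map (f := fun (fr : Int × List Int) => fr.1)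
        (g := fun (st : Option Int × Int) (i : Int) => pvStep st i (vf i))
        (l := PySem.List.enumerate mv 0) (init := ((none, -1) : Option Int × Int))).symm
    rw [hmap, PySem.List.map_fst_enumerate]
    rw [pvBridge vf ((mv.length : Int) - 0).toNat 0 _ _ (by omega)]
    simp
  -- A side normalisation: the write loop builds the totals list
  have hA : (PySem.List.pyRange 0 (mv.length : Int) 1).foldl
      (fun lst f => PySem.List.pySetD lst f ((PySem.List.pyGetD mv f []).sum * PySem.List.pyGetD mp f 0))
      (List.replicate (mv.length : Int).toNat 0)
      = (PySem.List.pyRange 0 (mv.length : Int) 1).map vf := by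
    rw [pvSetLoop vf ((mv.length : Int) - 0).toNat 0 _ _ (by omega) (by simp) rfl]
    simp
  -- peel the first row off the totals list
  obtain ⟨xs, hsplit⟩ : ∃ xs, (PySem.List.pyRange 0 (mv.length : Int) 1).map vf = vf 0 :: xs := by
    refine ⟨(PySem.List.pyRange 1 (mv.length : Int) 1).map vf, ?_⟩
    rw [PySem.List.pyRange_one_cons hn]; simp
  have hBval : calcProdMaxIngresosSem_alt mv mp =
      (if xs.foldl max (vf 0) > vf 0
       then 1 + (((PySem.List.index? xs (xs.foldl max (vf 0))).getD 0 : Nat) : Int)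
       else 0) + 1 := by
    rw [hB, hsplit, PySem.List.enumerate_cons]
    simp only [List.foldl_cons]
    have hfirst : pvStep (none, -1) 0 (vf 0) = (some (vf 0), 0) := rfl
    rw [hfirst, pvCoreVs xs (0+1) (vf 0) 0]
    split_ifs with h
    · norm_num
    · norm_num
  have hAval : calcProdMaxIngresosSem mv mp =
      (((PySem.List.index? (vf 0 :: xs) (xs.foldl max (vf 0))).getD 0 : Nat) : Int) + 1 := by
    show (((PySem.List.index? _ ((PySem.List.max? _ (fun y => y)).getD 0)).getD 0 : Nat) : Int) + 1 = _
    rw [hA, hsplit, PySem.List.max?_id_cons]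
    rfl
  rw [hAval, hBval]
  by_cases h : xs.foldl max (vf 0) > vf 0
  · have hxM : vf 0 ≠ xs.foldl max (vf 0) := by omega
    have hmem : xs.foldl max (vf 0) ∈ xs := by
      rcases PySem.List.foldl_max_mem xs (vf 0) with hh | hh
      · omega
      · exact hh
    rw [pvIdxCons (vf 0) xs _ hxM hmem, if_pos h]
    ring
  · have hMe : xs.foldl max (vf 0) = vf 0 := by
      have := (PySem.List.le_foldl_max xs (vf 0)).1
      omega
    rw [hMe] at h ⊢
    rw [PySem.List.index?_cons_self, if_neg h]
    simp

-- ===== VERDICT (by name: the statement is the Claim_ definition above) =====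
theorem calcProdMaxIngresosSem_spec : Claim_equal_calcProdMaxIngresosSem := by
  intro mv mp _ hpre
  unfold Spec_calcProdMaxIngresosSem
  exact pvMain mv mp hpre.1
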